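-- pv_equiv track=rewrite | github.com/project-codeflare/codeflare-sdk | src/codeflare_sdk/ray/rayjobs/rayjob.py | _get_workload_status_summary
-- ===== SOURCE A (Python) =====
-- def _get_workload_status_summary(workload_status: dict) -> str:
--     """
--     Get a summary status from Kueue workload status.
--
--     Args:
--         workload_status: The status section from a Kueue workload CR
--
--     Returns:
--         String summary of the workload status
--     """
--     conditions = workload_status.get("conditions", [])
--
--     # Check conditions in priority order
--     for condition_type in ["Finished", "Admitted", "QuotaReserved", "Pending"]:
--         for condition in conditions:
--             if (
--                 condition.get("type") == condition_type
--                 and condition.get("status") == "True"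
--             ):
--                 return condition_type
--
--     # If no clear status, return "Unknown"
--     return "Unknown"
-- ===== SOURCE B (Python) =====
-- def _get_workload_status_summary(workload_status: dict) -> str:
--     """
--     Get a summary status from Kueue workload status.
--
--     Single pass with a numeric accumulator: map each active condition's type
--     to its priority rank and keep the minimum rank seen; index the answer.
--     """
--     names = ["Finished", "Admitted", "QuotaReserved", "Pending", "Unknown"]
--     rank = {"Finished": 0, "Admitted": 1, "QuotaReserved": 2, "Pending": 3}
--     best = 4
--     for condition in workload_status.get("conditions", []):
--         if condition.get("status") == "True":
--             r = rank.get(condition.get("type"), 4)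
--             if r < best:
--                 best = r
--     return names[best]
-- ===== Notes on version B (the rewrite author's own statement) =====
-- stated objective: simpler
-- what changed: Replaces the nested priority-by-priority rescans with a single pass that maps each active condition's type to a numeric rank and keeps the minimum rank in an accumulator, then indexes the name table once; there is no loop over the priority list at all.
import Mathlib
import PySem

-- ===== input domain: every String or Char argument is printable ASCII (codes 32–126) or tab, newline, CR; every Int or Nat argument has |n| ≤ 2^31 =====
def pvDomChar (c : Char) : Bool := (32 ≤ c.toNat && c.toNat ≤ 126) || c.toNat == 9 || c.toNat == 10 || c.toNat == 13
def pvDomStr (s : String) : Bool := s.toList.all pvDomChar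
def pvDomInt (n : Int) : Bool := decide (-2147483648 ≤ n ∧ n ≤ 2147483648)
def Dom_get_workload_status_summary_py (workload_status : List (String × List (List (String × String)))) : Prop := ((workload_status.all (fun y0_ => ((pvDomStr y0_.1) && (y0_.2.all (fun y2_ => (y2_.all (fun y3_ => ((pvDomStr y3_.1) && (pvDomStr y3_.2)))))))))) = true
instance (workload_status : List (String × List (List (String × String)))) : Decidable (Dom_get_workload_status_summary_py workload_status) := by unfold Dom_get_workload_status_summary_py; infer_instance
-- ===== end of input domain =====

-- B replaces A's loop over the priority list with its nested rescans of the conditions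
-- by one pass keeping the minimum numeric rank of active condition types (objective: simpler).

-- ===== PORT A =====
-- inner loop: 'for condition in conditions: if condition.get("type") == t and condition.get("status") == "True": return t'
def pvInnerA (t : String) : List (List (String × String)) → Bool
  | [] => false
  | c :: rest =>
    if ((PySem.Dict.mk c).get? "type" == some t) && ((PySem.Dict.mk c).get? "status" == some "True")
    then true else pvInnerA t rest

-- outer loop over the priority list, early return
def pvOuterA (conds : List (List (String × String))) : List String → String
  | [] => "Unknown"
  | t :: ts => if pvInnerA t conds then t else pvOuterA conds ts

def get_workload_status_summary_py (workload_status : List (String × List (List (String × String)))) : String :=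
  pvOuterA ((PySem.Dict.mk workload_status).getD "conditions" [])
    ["Finished", "Admitted", "QuotaReserved", "Pending"]

-- ===== PORT B =====
-- names = [...]; rank = {...}
def pvNamesB : List String := ["Finished", "Admitted", "QuotaReserved", "Pending", "Unknown"]
def pvRankB : PySem.Dict String Nat :=
  PySem.Dict.mk [("Finished", 0), ("Admitted", 1), ("QuotaReserved", 2), ("Pending", 3)]

-- loop body: if status is "True", r = rank.get(type, 4); if r < best: best = r
def pvStepB (best : Nat) (c : List (String × String)) : Nat :=
  if (PySem.Dict.mk c).get? "status" == some "True" then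
    let r : Nat := match (PySem.Dict.mk c).get? "type" with
      | some t => pvRankB.getD t 4
      | none => 4   -- rank.get(None, 4)
    if r < best then r else best
  else best

def get_workload_status_summary_py_alt (workload_status : List (String × List (List (String × String)))) : String :=
  pvNamesB.getD
    (((PySem.Dict.mk workload_status).getD "conditions" []).foldl pvStepB 4)
    "Unknown"   -- names[best]: best ≤ 4 always, so plain in-range indexing

-- ===== PRECONDITION & SPEC =====
def Spec_get_workload_status_summary_py (workload_status : List (String × List (List (String × String)))) (out : String) : Prop := out = get_workload_status_summary_py_alt workload_status
instance (workload_status : List (String × List (List (String × String)))) (out : String) : Decidable (Spec_get_workload_status_summary_py workload_status out) := by unfold Spec_get_workload_status_summary_py; infer_instance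

-- ===== CLAIM (what is proved, stated in full; the proofs are below) =====
def Claim_equal_get_workload_status_summary_py : Prop := ∀ (workload_status : List (String × List (List (String × String)))), Dom_get_workload_status_summary_py workload_status → Spec_get_workload_status_summary_py workload_status (get_workload_status_summary_py workload_status)

-- ===== LEMMAS AND PROOFS =====

-- A's head test for priority type t on one condition
def pvHit (t : String) (c : List (String × String)) : Bool :=
  ((PySem.Dict.mk c).get? "type" == some t) && ((PySem.Dict.mk c).get? "status" == some "True")

-- the rank B's step compares against, per condition
def pvHdRank (c : List (String × String)) : Nat :=
  if (PySem.Dict.mk c).get? "status" == some "True" then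
    match (PySem.Dict.mk c).get? "type" with
    | some t => pvRankB.getD t 4
    | none => 4
  else 4

-- the first-true index of four booleans
def pvChain (b0 b1 b2 b3 : Bool) : Nat :=
  if b0 then 0 else if b1 then 1 else if b2 then 2 else if b3 then 3 else 4

theorem pvHdRank_eq_chain (c : List (String × String)) :
    pvHdRank c = pvChain (pvHit "Finished" c) (pvHit "Admitted" c)
      (pvHit "QuotaReserved" c) (pvHit "Pending" c) := by
  unfold pvHdRank pvHit pvChain
  by_cases hst : (PySem.Dict.mk c).get? "status" == some "True"
  · simp only [hst, if_true, Bool.and_true]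
    cases hty : (PySem.Dict.mk c).get? "type" with
    | none => simp
    | some t =>
      simp only [Option.some.injEq, beq_iff_eq]
      by_cases h0 : t = "Finished"
      · subst h0; decide
      by_cases h1 : t = "Admitted"
      · subst h1; decide
      by_cases h2 : t = "QuotaReserved"
      · subst h2; decide
      by_cases h3 : t = "Pending"
      · subst h3; decide
      · simp [pvRankB, PySem.Dict.getD_eq_get?_getD, PySem.Dict.get?, Ne.symm h0, Ne.symm h1, Ne.symm h2, Ne.symm h3, h0, h1, h2, h3]
  · simp [hst]

theorem pvStepB_eq_min (b : Nat) (c : List (String × String)) (hb : b ≤ 4) :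
    pvStepB b c = min b (pvHdRank c) := by
  unfold pvStepB pvHdRank
  by_cases hst : (PySem.Dict.mk c).get? "status" == some "True"
  · simp only [hst, if_true]
    cases (PySem.Dict.mk c).get? "type" <;> simp [Nat.min_def] <;> split_ifs <;> omega
  · simp only [Bool.not_eq_true] at hst
    simp [hst, Nat.min_def]; omega

theorem pvChain_le_four (b0 b1 b2 b3 : Bool) : pvChain b0 b1 b2 b3 ≤ 4 := by
  unfold pvChain; split_ifs <;> omega

theorem pvInnerA_eq_any (t : String) (conds : List (List (String × String))) :
    pvInnerA t conds = conds.any (pvHit t) := by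
  induction conds with
  | nil => rfl
  | cons c rest ih =>
    simp only [pvInnerA, List.any_cons, ← ih, pvHit]
    by_cases h : ((PySem.Dict.mk c).get? "type" == some t) && ((PySem.Dict.mk c).get? "status" == some "True") <;> simp [h]

theorem pvMin_chain (h0 h1 h2 h3 b0 b1 b2 b3 : Bool) :
    min (pvChain h0 h1 h2 h3) (pvChain b0 b1 b2 b3)
      = pvChain (h0 || b0) (h1 || b1) (h2 || b2) (h3 || b3) := by
  cases h0 <;> cases h1 <;> cases h2 <;> cases h3 <;> cases b0 <;> cases b1 <;> cases b2 <;> cases b3 <;> rfl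

-- the fold computes the first-true index of the "any active condition of this type" booleans
theorem pvFold_eq_chain (conds : List (List (String × String))) :
    ∀ b : Nat, b ≤ 4 → conds.foldl pvStepB b
      = min b (pvChain (conds.any (pvHit "Finished")) (conds.any (pvHit "Admitted"))
          (conds.any (pvHit "QuotaReserved")) (conds.any (pvHit "Pending"))) := by
  induction conds with
  | nil => intro b hb; simp [pvChain]; omega
  | cons c rest ih =>
    intro b hb
    have hstep : pvStepB b c ≤ 4 := by
      rw [pvStepB_eq_min b c hb]; omega
    rw [List.foldl_cons, ih _ hstep, pvStepB_eq_min b c hb, pvHdRank_eq_chain]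
    simp only [List.any_cons]
    rw [Nat.min_assoc, pvMin_chain]

theorem pvChain_index (b0 b1 b2 b3 : Bool) :
    pvNamesB.getD (pvChain b0 b1 b2 b3) "Unknown"
      = (if b0 then "Finished" else if b1 then "Admitted" else
         if b2 then "QuotaReserved" else if b3 then "Pending" else "Unknown") := by
  cases b0 <;> cases b1 <;> cases b2 <;> cases b3 <;> rfl

-- ===== VERDICT (by name: the statement is the Claim_ definition above) =====
theorem get_workload_status_summary_py_spec : Claim_equal_get_workload_status_summary_py := by
  intro ws _
  unfold Spec_get_workload_status_summary_py get_workload_status_summary_py get_workload_status_summary_py_alt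
  set conds := (PySem.Dict.mk ws).getD "conditions" [] with hconds
  rw [pvFold_eq_chain conds 4 (le_refl 4),
    Nat.min_eq_right (pvChain_le_four _ _ _ _), pvChain_index]
  simp [pvOuterA, pvInnerA_eq_any]
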